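-- pv_equiv track=rewrite | github.com/rhordoan/RiemannianSwarmSurgery | benchmarks/otg_funnel_analysis.py | _follow_to_terminal
-- ===== SOURCE A (Python) =====
-- def _follow_to_terminal(edges, start):
--     """Follow edges until cycle detected. Return cycle representative (min node in cycle)."""
--     visited = set()
--     path = []
--     current = start
--     while current not in visited:
--         visited.add(current)
--         path.append(current)
--         nxt = edges.get(current, current)
--         if nxt == current:
--             return current
--         current = nxt
--     # current is in a cycle — find cycle and return min node as representative
--     cycle_start = path.index(current)
--     cycle = path[cycle_start:]
--     return min(cycle)
-- ===== SOURCE B (Python) =====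
-- def _follow_to_terminal(edges, start):
--     """Iterate len(edges) steps to land inside the cycle, then take the min over
--     len(edges) more steps (which wrap the whole cycle at least once)."""
--     cur = start
--     for _ in range(len(edges)):
--         cur = edges.get(cur, cur)
--     best = cur
--     for _ in range(len(edges)):
--         cur = edges.get(cur, cur)
--         if cur < best:
--             best = cur
--     return best
-- ===== Notes on version B (the rewrite author's own statement) =====
-- stated objective: alternative
-- what changed: Replaced the visited-set/path-trace cycle detection (hash set, appended path, path.index, min over a slice) by two fixed-length scans with O(1) extra state: iterate the step map len(edges) times to land inside the cycle, then take a running minimum over len(edges) further steps, which wrap the whole cycle at least once.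
import Mathlib
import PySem

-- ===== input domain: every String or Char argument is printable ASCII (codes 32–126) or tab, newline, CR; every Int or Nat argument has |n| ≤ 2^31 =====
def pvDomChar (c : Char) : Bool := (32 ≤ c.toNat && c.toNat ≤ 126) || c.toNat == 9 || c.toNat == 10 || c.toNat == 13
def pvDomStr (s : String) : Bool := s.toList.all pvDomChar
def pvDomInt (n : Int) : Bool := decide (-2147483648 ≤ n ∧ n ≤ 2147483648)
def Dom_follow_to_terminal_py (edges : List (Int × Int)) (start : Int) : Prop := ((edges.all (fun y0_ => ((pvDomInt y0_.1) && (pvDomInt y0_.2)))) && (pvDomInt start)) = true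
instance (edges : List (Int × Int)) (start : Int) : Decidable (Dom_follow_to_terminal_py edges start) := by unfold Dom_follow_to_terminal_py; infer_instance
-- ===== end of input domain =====

-- B replaces A's visited-set/path-trace cycle detection by two fixed-length scans
-- (iterate len(edges) steps to reach the cycle, then a running min over len(edges)
-- more steps); genuinely different decomposition, same O(n) cost.

-- ===== PORT A =====
-- edges.get(current, current): Python dict lookup with default
def pvGet (edges : List (Int × Int)) (c : Int) : Int := (PySem.Dict.mk edges).getD c c


lemma pvGet_ne_imp_mem (edges : List (Int × Int)) (c : Int) (h : pvGet edges c ≠ c) :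
    c ∈ edges.map Prod.fst := by
  induction edges with
  | nil => simp [pvGet, PySem.Dict.getD, PySem.Dict.get?] at h
  | cons e t ih =>
    obtain ⟨k, v⟩ := e
    by_cases he : k = c
    · simp [he]
    · simp only [pvGet, PySem.Dict.getD_eq_get?_getD, PySem.Dict.get?_mk_cons] at h
      rw [if_neg (by simpa using he)] at h
      simp only [List.map_cons, List.mem_cons]
      exact Or.inr (ih (by simpa [pvGet, PySem.Dict.getD_eq_get?_getD] using h))

lemma pv_filter_and_lt (l : List Int) (p : Int → Bool) (c : Int)
    (hcl : c ∈ l) (hpc : p c = true) :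
    (l.filter (fun k => p k && !decide (k = c))).length < (l.filter p).length := by
  induction l with
  | nil => cases hcl
  | cons a t ih =>
    by_cases hac : a = c
    · subst hac
      have h1 : (t.filter (fun k => p k && !decide (k = a))).length ≤ (t.filter p).length := by
        rw [← List.countP_eq_length_filter, ← List.countP_eq_length_filter]
        exact List.countP_mono_left (fun x _ hx => by simp at hx; exact hx.1)
      simp [hpc]
      omega
    · have hct : c ∈ t := by
        rcases List.mem_cons.mp hcl with h2 | h2
        · exact absurd h2.symm hac
        · exact h2
      have hlt := ih hct
      by_cases hpa : p a = true
      · simp [hpa, hac]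
        omega
      · simp only [Bool.not_eq_true] at hpa
        simp [hpa]
        omega

lemma pv_measure_lt (l : List Int) (visited : PySem.Set Int) (c : Int)
    (hcl : c ∈ l) (hv : ¬ (PySem.Set.contains visited c = true)) :
    (l.filter (fun k => !(PySem.Set.contains (PySem.Set.add visited c) k))).length <
      (l.filter (fun k => !(PySem.Set.contains visited k))).length := by
  have hrw : l.filter (fun k => !(PySem.Set.contains (PySem.Set.add visited c) k)) =
      l.filter (fun k => (!(PySem.Set.contains visited k)) && !decide (k = c)) := by
    apply List.filter_congr
    intro x _
    simp only [PySem.Set.contains_eq_listContains, List.contains_eq_mem, PySem.Set.mem_add,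
      Bool.decide_or, Bool.not_or]
  rw [hrw]
  exact pv_filter_and_lt l _ c hcl
    (by simpa [PySem.Set.contains_eq_listContains, List.contains_eq_mem] using hv)

def aloop (edges : List (Int × Int)) (visited : PySem.Set Int) (path : List Int)
    (current : Int) : Int :=
  if PySem.Set.contains visited current then
    let cycleStart : Nat := (PySem.List.index? path current).getD 0
    let cycle := PySem.List.slice path (some (cycleStart : Int)) none
    (PySem.List.min? cycle (fun x => x)).getD 0
  else
    let visited' := PySem.Set.add visited current
    let path' := path ++ [current]
    let nxt := pvGet edges current
    if nxt = current then current
    else aloop edges visited' path' nxt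
termination_by ((edges.map Prod.fst).filter (fun k => !(PySem.Set.contains visited k))).length
decreasing_by
  exact pv_measure_lt (edges.map Prod.fst) visited current
    (pvGet_ne_imp_mem edges current (by assumption)) (by assumption)


def follow_to_terminal_py (edges : List (Int × Int)) (start : Int) : Int :=
  aloop edges PySem.Set.empty [] start


-- ===== PORT B =====
def follow_to_terminal_py_alt (edges : List (Int × Int)) (start : Int) : Int :=
  let n : Int := PySem.List.len edges
  let cur : Int := (PySem.List.pyRange 0 n 1).foldl (fun c _ => pvGet edges c) start
  let bc : Int × Int := (PySem.List.pyRange 0 n 1).foldl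
    (fun p _ =>
      let c := pvGet edges p.2
      (if c < p.1 then c else p.1, c))
    (cur, cur)
  bc.1


-- ===== PRECONDITION & SPEC =====
def Spec_follow_to_terminal_py (edges : List (Int × Int)) (start : Int) (out : Int) : Prop := out = follow_to_terminal_py_alt edges start
instance (edges : List (Int × Int)) (start : Int) (out : Int) : Decidable (Spec_follow_to_terminal_py edges start out) := by unfold Spec_follow_to_terminal_py; infer_instance

-- ===== CLAIM (what is proved, stated in full; the proofs are below) =====
def Claim_equal_follow_to_terminal_py : Prop := ∀ (edges : List (Int × Int)) (start : Int), Dom_follow_to_terminal_py edges start → Spec_follow_to_terminal_py edges start (follow_to_terminal_py edges start)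

-- ===== LEMMAS AND PROOFS =====
def pvC (edges : List (Int × Int)) (start : Int) : Set Int :=
  {x | (∃ m : ℕ, (pvGet edges)^[m] start = x) ∧ ∃ p : ℕ, 0 < p ∧ (pvGet edges)^[p] x = x}


lemma pv_push (f : Int → Int) (x : Int) (p' : ℕ) (hp : f^[p'] x = x) (t : ℕ) :
    f^[t * p'] x = x := by
  rw [Nat.mul_comm, Function.iterate_mul]
  exact Function.iterate_fixed hp t

lemma pv_shift (f : Int → Int) (s : Int) (j p : ℕ) (hc : f^[j + p] s = f^[j] s) (d : ℕ) :
    f^[j + p + d] s = f^[j + d] s := by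
  have h1 : f^[j + p + d] s = f^[d] (f^[j + p] s) := by
    rw [← Function.iterate_add_apply]; ring_nf
  have h2 : f^[j + d] s = f^[d] (f^[j] s) := by
    rw [← Function.iterate_add_apply]; ring_nf
  rw [h1, h2, hc]

lemma pv_mod_of (f : Int → Int) (s : Int) (j p : ℕ) (hp : 0 < p)
    (hc : f^[j + p] s = f^[j] s) : ∀ q : ℕ, f^[j + q] s = f^[j + q % p] s := by
  intro q
  induction q using Nat.strong_induction_on with
  | _ q ih =>
    by_cases hq : q < p
    · rw [Nat.mod_eq_of_lt hq]
    · rw [not_lt] at hq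
      have h1 : q = (q - p) + p := by omega
      have h2 : f^[j + q] s = f^[j + (q - p)] s := by
        have := pv_shift f s j p hc (q - p)
        calc f^[j + q] s = f^[j + p + (q - p)] s := by rw [show j + q = j + p + (q - p) by omega]
          _ = f^[j + (q - p)] s := this
      rw [h2, ih (q - p) (by omega)]
      rw [Nat.mod_eq_sub_mod hq]

lemma pv_period_of (f : Int → Int) (s : Int) (j p : ℕ)
    (hc : f^[j + p] s = f^[j] s) : ∀ m, j ≤ m → f^[p] (f^[m] s) = f^[m] s := by
  intro m hm
  have h1 : f^[p] (f^[m] s) = f^[m + p] s := by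
    rw [← Function.iterate_add_apply]; ring_nf
  rw [h1, show m + p = j + p + (m - j) by omega, pv_shift f s j p hc (m - j)]
  congr 1
  omega

lemma pv_exists_rep (edges : List (Int × Int)) (start : Int) :
    ∃ j k : ℕ, j < k ∧ k ≤ edges.length + 1 ∧
      (pvGet edges)^[j] start = (pvGet edges)^[k] start := by
  set f := pvGet edges with hf
  set n := edges.length with hn
  by_cases hfix : ∃ i, i ≤ n ∧ f (f^[i] start) = f^[i] start
  · obtain ⟨i, hi, hfx⟩ := hfix
    exact ⟨i, i + 1, by omega, by omega, by rw [Function.iterate_succ_apply', hfx]⟩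
  · rw [not_exists] at hfix
    have hmem : ∀ i ∈ Finset.range (n + 1), f^[i] start ∈ (edges.map Prod.fst).toFinset := by
      intro i hi
      rw [Finset.mem_range] at hi
      have hne : f (f^[i] start) ≠ f^[i] start := by
        intro hcon; exact hfix i ⟨by omega, hcon⟩
      exact List.mem_toFinset.mpr (pvGet_ne_imp_mem edges _ hne)
    have hcard : (edges.map Prod.fst).toFinset.card < (Finset.range (n + 1)).card := by
      have h1 : (edges.map Prod.fst).toFinset.card ≤ (edges.map Prod.fst).length :=
        List.toFinset_card_le _
      simp only [List.length_map] at h1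
      rw [Finset.card_range]
      omega
    obtain ⟨a, ha, b, hb, hab, heq⟩ :=
      Finset.exists_ne_map_eq_of_card_lt_of_maps_to hcard hmem
    rw [Finset.mem_range] at ha hb
    rcases Nat.lt_or_ge a b with h | h
    · exact ⟨a, b, h, by omega, heq⟩
    · exact ⟨b, a, by omega, by omega, heq.symm⟩

-- a fold that ignores the list elements is function iteration
lemma pv_foldl_const {γ : Type} (l : List γ) (g : Int → Int) (init : Int) :
    l.foldl (fun c _ => g c) init = g^[l.length] init := by
  induction l generalizing init with
  | nil => rfl
  | cons a t ih => simp [List.foldl_cons, ih, Function.iterate_succ_apply]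

-- full description of B's running-minimum fold
lemma pv_fold_min {γ : Type} (f : Int → Int) (l : List γ) (b c : Int) :
    (l.foldl (fun p (_ : γ) => (if f p.2 < p.1 then f p.2 else p.1, f p.2)) (b, c)).2
        = f^[l.length] c ∧
    ((l.foldl (fun p (_ : γ) => (if f p.2 < p.1 then f p.2 else p.1, f p.2)) (b, c)).1 = b ∨
      ∃ i, 1 ≤ i ∧ i ≤ l.length ∧
        (l.foldl (fun p (_ : γ) => (if f p.2 < p.1 then f p.2 else p.1, f p.2)) (b, c)).1
          = f^[i] c) ∧
    (l.foldl (fun p (_ : γ) => (if f p.2 < p.1 then f p.2 else p.1, f p.2)) (b, c)).1 ≤ b ∧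
    (∀ i, 1 ≤ i → i ≤ l.length →
      (l.foldl (fun p (_ : γ) => (if f p.2 < p.1 then f p.2 else p.1, f p.2)) (b, c)).1
        ≤ f^[i] c) := by
  induction l generalizing b c with
  | nil =>
    refine ⟨rfl, Or.inl rfl, le_refl _, ?_⟩
    intro i h1 h2
    simp at h2
    omega
  | cons a t ih =>
    have step : ((a :: t).foldl (fun p (_ : γ) => (if f p.2 < p.1 then f p.2 else p.1, f p.2)) (b, c))
        = t.foldl (fun p (_ : γ) => (if f p.2 < p.1 then f p.2 else p.1, f p.2))
            (if f c < b then f c else b, f c) := by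
      simp [List.foldl_cons]
    obtain ⟨ih2, ihmem, ihleb, ihle⟩ := ih (if f c < b then f c else b) (f c)
    rw [step]
    refine ⟨by rw [ih2, List.length_cons, Function.iterate_succ_apply], ?_, ?_, ?_⟩
    · rcases ihmem with h | ⟨i, h1, h2, h3⟩
      · by_cases hlt : f c < b
        · right; exact ⟨1, le_refl _, by simp, by rw [h, if_pos hlt]; simp⟩
        · left; rw [h, if_neg hlt]
      · right
        refine ⟨i + 1, by omega, by simp; omega, ?_⟩
        rw [h3, Function.iterate_succ_apply]
    · exact le_trans ihleb (by split <;> omega)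
    · intro i h1 h2
      match i, h1 with
      | 1, _ =>
        have : f^[1] c = f c := by simp
        rw [this]
        exact le_trans ihleb (by split <;> omega)
      | (i + 2), _ =>
        have := ihle (i + 1) (by omega) (by simp at h2; omega)
        rw [Function.iterate_succ_apply]
        simpa [Function.iterate_succ_apply] using this

lemma pv_alt_isLeast (edges : List (Int × Int)) (start : Int) :
    IsLeast (pvC edges start) (follow_to_terminal_py_alt edges start) := by
  set f := pvGet edges with hf
  set N := edges.length with hN
  have hlen : (PySem.List.pyRange 0 (PySem.List.len edges) 1).length = N := by
    rw [PySem.List.len_eq, PySem.List.length_pyRange_one]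
    omega
  have hcur : (PySem.List.pyRange 0 (PySem.List.len edges) 1).foldl
      (fun c _ => pvGet edges c) start = f^[N] start := by
    rw [pv_foldl_const, hlen]
  obtain ⟨hsnd, hmem, hleb, hle⟩ :=
    pv_fold_min f (PySem.List.pyRange 0 (PySem.List.len edges) 1) (f^[N] start) (f^[N] start)
  have halt : follow_to_terminal_py_alt edges start =
      ((PySem.List.pyRange 0 (PySem.List.len edges) 1).foldl
        (fun p _ => (if f p.2 < p.1 then f p.2 else p.1, f p.2))
        (f^[N] start, f^[N] start)).1 := by
    show ((PySem.List.pyRange 0 (PySem.List.len edges) 1).foldl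
        (fun p _ =>
          let c := pvGet edges p.2
          (if c < p.1 then c else p.1, c))
        ((PySem.List.pyRange 0 (PySem.List.len edges) 1).foldl
          (fun c _ => pvGet edges c) start,
         (PySem.List.pyRange 0 (PySem.List.len edges) 1).foldl
          (fun c _ => pvGet edges c) start)).1 = _
    rw [hcur]
  rw [hlen] at hmem hle
  set B := ((PySem.List.pyRange 0 (PySem.List.len edges) 1).foldl
        (fun p _ => (if f p.2 < p.1 then f p.2 else p.1, f p.2))
        (f^[N] start, f^[N] start)).1 with hB
  obtain ⟨j, k, hjk, hkN, hrep⟩ := pv_exists_rep edges start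
  set p := k - j with hp'
  have hp : 0 < p := by omega
  have hpN : p ≤ N + 1 := by omega
  have hjN : j ≤ N := by omega
  have hc : f^[j + p] start = f^[j] start := by
    rw [show j + p = k by omega]; exact hrep.symm
  rw [halt]
  constructor
  · -- B is in the cycle
    have hBeq : ∃ q : ℕ, B = f^[q] start ∧ j ≤ q := by
      rcases hmem with h | ⟨i, hi1, hi2, h⟩
      · exact ⟨N, h, hjN⟩
      · refine ⟨i + N, ?_, by omega⟩
        rw [h, ← Function.iterate_add_apply]
    obtain ⟨q, hq, hjq⟩ := hBeq
    exact ⟨⟨q, hq.symm⟩, ⟨p, hp, by rw [hq]; exact pv_period_of f start j p hc q hjq⟩⟩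
  · -- B is a lower bound of the cycle
    rintro x ⟨⟨m0, hm0⟩, p', hp'pos, hper⟩
    set m' := m0 + N * p' with hm'
    have hxm' : f^[m'] start = x := by
      rw [hm', Nat.add_comm, Function.iterate_add_apply, hm0, pv_push f x p' hper N]
    have hm'N : N ≤ m' := by
      have : N ≤ N * p' := Nat.le_mul_of_pos_right N hp'pos
      omega
    set i := (m' - N) % p with hi
    have hiplt : i < p := Nat.mod_lt _ hp
    have hiN : i ≤ N := by omega
    -- f^[N + i] start = f^[m'] start  (both reduce mod p over base j)
    have hmod := pv_mod_of f start j p hp hc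
    have e1 := hmod (m' - j)
    rw [show j + (m' - j) = m' by omega] at e1
    have e2 := hmod (N + i - j)
    rw [show j + (N + i - j) = N + i by omega] at e2
    have emod : (m' - j) % p = (N + i - j) % p := by
      have h1 : m' - j = (N - j) + (m' - N) := by omega
      have h2 : N + i - j = (N - j) + i := by omega
      rw [h1, h2, Nat.add_mod]
      conv_rhs => rw [Nat.add_mod]
      rw [Nat.mod_mod_of_dvd _ (dvd_refl p)]
    have hqx : f^[N + i] start = x := by
      rw [e2, ← emod, ← e1, hxm']
    by_cases hi0 : i = 0
    · rw [← hqx, hi0]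
      simpa using hleb
    · rw [← hqx]
      have := hle i (by omega) hiN
      rw [← Function.iterate_add_apply, Nat.add_comm] at this
      exact this


lemma pv_aloop_isLeast (edges : List (Int × Int)) (start : Int) :
    ∀ (visited : PySem.Set Int) (path : List Int) (current : Int),
      (∃ k : ℕ, path = (List.range k).map (fun i => (pvGet edges)^[i] start) ∧
        current = (pvGet edges)^[k] start ∧
        (∀ x, PySem.Set.contains visited x = true ↔ x ∈ path)) →
      IsLeast (pvC edges start) (aloop edges visited path current) := by
  set f := pvGet edges with hf
  intro visited path current
  induction visited, path, current using aloop.induct edges with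
  | case1 visited path current hin =>
    rintro ⟨k, hpath, hcur, hvis⟩
    rw [aloop, if_pos hin]
    have hmem : current ∈ path := (hvis current).mp hin
    have hidx : ∃ j0, PySem.List.index? path current = some j0 :=
      Option.isSome_iff_exists.mp ((PySem.List.index?_isSome_iff _ _).mpr hmem)
    obtain ⟨j0, hj0⟩ := hidx
    obtain ⟨hj0lt, hj0get, -⟩ := PySem.List.getElem_of_index?_eq_some hj0
    rw [hj0]
    have hplen : path.length = k := by rw [hpath]; simp
    have hpget : ∀ i (h : i < k), path[i]'(by omega) = f^[i] start := by
      intro i h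
      subst hpath
      simp
    have hslice : PySem.List.slice path (some ((j0 : Nat) : Int)) none = path.drop j0 :=
      PySem.List.slice_from_natCast path j0
    simp only [Option.getD_some, hslice]
    have hj0k : j0 < k := by omega
    -- current closes a cycle: f^[k] start = f^[j0] start
    have hcyc0 : f^[j0] start = current := by rw [← hpget j0 hj0k]; exact hj0get
    have hrep : f^[j0 + (k - j0)] start = f^[j0] start := by
      rw [show j0 + (k - j0) = k by omega, hcyc0, hcur]
    set p := k - j0 with hpdef
    have hp : 0 < p := by omega
    -- the sliced list is exactly {f^[i] start : j0 ≤ i < k}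
    have hdlen : (path.drop j0).length = k - j0 := by rw [List.length_drop, hplen]
    have hdget : ∀ t (h : t < k - j0), (path.drop j0)[t]'(by omega) = f^[j0 + t] start := by
      intro t h
      rw [List.getElem_drop]
      exact hpget (j0 + t) (by omega)
    have hdmem : ∀ x, x ∈ path.drop j0 ↔ ∃ i, j0 ≤ i ∧ i < k ∧ x = f^[i] start := by
      intro x
      constructor
      · intro hx
        obtain ⟨t, ht, hget⟩ := List.mem_iff_getElem.mp hx
        rw [hdlen] at ht
        exact ⟨j0 + t, by omega, by omega, by rw [← hget, hdget t ht]⟩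
      · rintro ⟨i, hi1, hi2, rfl⟩
        apply List.mem_iff_getElem.mpr
        exact ⟨i - j0, by omega, by rw [hdget (i - j0) (by omega)]; congr 1; omega⟩
    -- min? is some
    have hne : path.drop j0 ≠ [] := by
      intro hcon
      have := hdlen
      rw [hcon] at this
      simp at this
      omega
    obtain ⟨m, hm⟩ : ∃ m, PySem.List.min? (path.drop j0) (fun x => x) = some m := by
      cases hmin : PySem.List.min? (path.drop j0) (fun x => x) with
      | none => exact absurd ((PySem.List.min?_eq_none_iff _ _).mp hmin) hne
      | some m => exact ⟨m, rfl⟩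
    rw [hm, Option.getD_some]
    have hmmem := PySem.List.min?_mem hm
    have hmmin := PySem.List.min?_isMin hm
    constructor
    · -- m is in the cycle
      obtain ⟨i, hi1, hi2, rfl⟩ := (hdmem m).mp hmmem
      exact ⟨⟨i, rfl⟩, ⟨p, hp, pv_period_of f start j0 p hrep i hi1⟩⟩
    · -- m is a lower bound
      rintro x ⟨⟨m0, hm0⟩, p', hp'pos, hper⟩
      set m' := m0 + k * p' with hm'd
      have hxm' : f^[m'] start = x := by
        rw [hm'd, Nat.add_comm, Function.iterate_add_apply, hm0, pv_push f x p' hper k]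
      have hm'k : k ≤ m' := by
        have : k ≤ k * p' := Nat.le_mul_of_pos_right k hp'pos
        omega
      have hmod := pv_mod_of f start j0 p hp hrep
      have e1 := hmod (m' - j0)
      rw [show j0 + (m' - j0) = m' by omega] at e1
      have hin2 : f^[j0 + (m' - j0) % p] start ∈ path.drop j0 := by
        apply (hdmem _).mpr
        refine ⟨j0 + (m' - j0) % p, by omega, ?_, rfl⟩
        have := Nat.mod_lt (m' - j0) hp
        omega
      have := hmmin _ hin2
      rw [← e1, hxm'] at this
      exact this
  | case2 visited path current hnin nxt hfix =>
    rintro ⟨k, hpath, hcur, hvis⟩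
    rw [aloop, if_neg hnin, if_pos hfix]
    have hfx : f current = current := hfix
    constructor
    · exact ⟨⟨k, hcur.symm⟩, ⟨1, Nat.one_pos, by simpa using hfx⟩⟩
    · rintro x ⟨⟨m0, hm0⟩, p', hp'pos, hper⟩
      set m' := m0 + k * p' with hm'd
      have hxm' : f^[m'] start = x := by
        rw [hm'd, Nat.add_comm, Function.iterate_add_apply, hm0, pv_push f x p' hper k]
      have hm'k : k ≤ m' := by
        have : k ≤ k * p' := Nat.le_mul_of_pos_right k hp'pos
        omega
      have : f^[m'] start = current := by
        rw [show m' = (m' - k) + k by omega, Function.iterate_add_apply, ← hcur,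
          Function.iterate_fixed hfx]
      rw [this] at hxm'
      rw [← hxm']
  | case3 visited path current hnin visited' path' nxt hne ih =>
    rintro ⟨k, hpath, hcur, hvis⟩
    rw [aloop, if_neg hnin, if_neg hne]
    apply ih
    refine ⟨k + 1, ?_, ?_, ?_⟩
    · show path ++ [current] = _
      rw [List.range_succ, List.map_append, ← hpath, hcur]
      simp
    · show pvGet edges current = f^[k + 1] start
      rw [Function.iterate_succ_apply', ← hcur, hf]
    · intro x
      rw [PySem.Set.contains_iff _ _, PySem.Set.mem_add, List.mem_append]
      constructor
      · rintro (hx | rfl)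
        · exact Or.inl ((hvis x).mp ((PySem.Set.contains_iff _ _).mpr hx))
        · simp
      · rintro (hx | hx)
        · exact Or.inl ((PySem.Set.contains_iff _ _).mp ((hvis x).mpr hx))
        · simp at hx
          exact Or.inr hx

lemma pv_a_isLeast (edges : List (Int × Int)) (start : Int) :
    IsLeast (pvC edges start) (follow_to_terminal_py edges start) := by
  apply pv_aloop_isLeast
  refine ⟨0, by simp, by simp, ?_⟩
  intro x
  simp [PySem.Set.contains_eq_listContains, PySem.Set.empty]


-- ===== VERDICT (by name: the statement is the Claim_ definition above) =====
theorem follow_to_terminal_py_spec : Claim_equal_follow_to_terminal_py := by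
  intro edges start _
  unfold Spec_follow_to_terminal_py
  exact (pv_a_isLeast edges start).unique (pv_alt_isLeast edges start)
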